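-- pv_equiv track=rewrite | github.com/Daniel20010822/Breadboard-Connection-Checker | post_processing.py | update_equivalence
-- ===== SOURCE A (Python) =====
-- class DisjointSet:
--     def __init__(self):
--         self.parent = {}
--
--     def make_set(self, item):
--         self.parent[item] = item
--
--     def find(self, item):
--         if self.parent[item] != item:
--             self.parent[item] = self.find(self.parent[item])  # 路徑壓縮
--         return self.parent[item]
--
--     def union(self, item1, item2):
--         root1 = self.find(item1)
--         root2 = self.find(item2)
--         if root1 != root2:
--             for key in self.parent.keys():
--                 if self.parent[key] == root1:
--                     self.parent[key] = root2
--
-- def update_equivalence(items, equivalences):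
--     disjoint_set = DisjointSet()
--
--     for item in items:
--         disjoint_set.make_set(item)
--
--     for equivalence in equivalences:
--         if len(equivalence) > 1:
--             disjoint_set.union(equivalence[0], equivalence[1])
--
--     return disjoint_set.parent
-- ===== SOURCE B (Python) =====
-- def update_equivalence(items, equivalences):
--     # Lazy union-find forest: one pointer update per union (root1 -> root2),
--     # roots resolved by chain-walking; final pass flattens every item.
--     parent = {item: item for item in items}
--
--     def find(x):
--         while parent[x] != x:
--             x = parent[x]
--         return x
--
--     for equivalence in equivalences:
--         if len(equivalence) > 1:
--             root1 = find(equivalence[0])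
--             root2 = find(equivalence[1])
--             if root1 != root2:
--                 parent[root1] = root2
--
--     return {item: find(item) for item in items}
-- ===== Notes on version B (the rewrite author's own statement) =====
-- stated objective: alternative
-- what changed: A keeps the parent map fully flattened by scanning and relabelling every key on each union; B keeps a lazy union-find forest (one pointer update root1->root2 per union, roots found by chain walking) and flattens only once at the end with a find() per item.
import Mathlib
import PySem

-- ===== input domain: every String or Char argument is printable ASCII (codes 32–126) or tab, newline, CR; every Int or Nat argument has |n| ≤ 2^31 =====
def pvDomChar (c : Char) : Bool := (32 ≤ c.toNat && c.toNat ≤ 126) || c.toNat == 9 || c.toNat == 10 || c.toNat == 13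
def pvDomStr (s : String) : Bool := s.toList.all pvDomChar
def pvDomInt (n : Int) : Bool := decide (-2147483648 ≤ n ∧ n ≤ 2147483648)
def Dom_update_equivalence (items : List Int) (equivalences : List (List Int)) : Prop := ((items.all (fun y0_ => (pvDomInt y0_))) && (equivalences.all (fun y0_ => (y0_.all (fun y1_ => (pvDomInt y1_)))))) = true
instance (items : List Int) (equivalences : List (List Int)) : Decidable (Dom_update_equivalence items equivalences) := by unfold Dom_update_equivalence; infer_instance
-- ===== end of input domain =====

-- B replaces A's eager per-union relabel scan of the whole parent map by a lazy
-- union-find forest (one pointer update per union, final find() pass): alternative.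


-- ===== PORT A =====
-- DisjointSet.find with path compression; fuel-guarded structural recursion
-- (Python's recursion is unbounded; inside Pre_ the map is always flat, so
-- depth ≤ 2 and any fuel ≥ 2 computes exactly what Python computes).
-- `d.getD x x` stands for Python's `self.parent[x]`, which raises KeyError on a
-- missing key; those inputs are excluded by Pre_update_equivalence.
def aFind : Nat → PySem.Dict Int Int → Int → (PySem.Dict Int Int × Int)
  | 0, d, x => (d, d.getD x x)
  | f + 1, d, x =>
      let px := d.getD x x
      if px ≠ x then
        let dr := aFind f d px
        let d2 := dr.1.insert x dr.2
        (d2, d2.getD x x)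
      else (d, d.getD x x)

-- DisjointSet.union: find both roots, then relabel every key mapped to root1.
def aUnion (fuel : Nat) (d : PySem.Dict Int Int) (a b : Int) : PySem.Dict Int Int :=
  let f1 := aFind fuel d a
  let f2 := aFind fuel f1.1 b
  if f1.2 ≠ f2.2 then
    f2.1.keys.foldl (fun dd k => if dd.getD k k = f1.2 then dd.insert k f2.2 else dd) f2.1
  else f2.1

def update_equivalence (items : List Int) (equivalences : List (List Int)) : List (Int × Int) :=
  let d0 := items.foldl (fun d it => d.insert it it) PySem.Dict.empty
  let fuel := items.length + 2
  let dF := equivalences.foldl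
    (fun d eq =>
      if 1 < PySem.List.len eq then
        aUnion fuel d (PySem.List.pyGetD eq 0 0) (PySem.List.pyGetD eq 1 0)
      else d) d0
  dF.items

-- ===== PORT B =====
-- find(x): walk the parent chain to the root (no mutation); fuel-guarded
-- (Python's while-loop; inside Pre_ chains are acyclic with length ≤ number of
-- unions performed, so fuel = equivalences.length + 1 suffices exactly).
def bFind (fuel : Nat) (p : PySem.Dict Int Int) (x : Int) : Int :=
  match fuel with
  | 0 => x
  | f + 1 =>
      let y := p.getD x x
      if y = x then x else bFind f p y

def update_equivalence_alt (items : List Int) (equivalences : List (List Int)) : List (Int × Int) :=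
  let p0 := items.foldl (fun d it => d.insert it it) PySem.Dict.empty
  let fuel := equivalences.length + 1
  let pF := equivalences.foldl
    (fun p eq =>
      if 1 < PySem.List.len eq then
        let r1 := bFind fuel p (PySem.List.pyGetD eq 0 0)
        let r2 := bFind fuel p (PySem.List.pyGetD eq 1 0)
        if r1 ≠ r2 then p.insert r1 r2 else p
      else p) p0
  (items.foldl (fun d it => d.insert it (bFind fuel pF it)) PySem.Dict.empty).items

-- ===== PRECONDITION & SPEC =====
-- Pre_ excludes exactly the inputs on which Python A raises KeyError: an
-- equivalence of length > 1 whose first two elements are not both in items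
-- (B raises KeyError there too).
def Pre_update_equivalence (items : List Int) (equivalences : List (List Int)) : Prop :=
  ∀ e ∈ equivalences, 1 < e.length → e.getD 0 0 ∈ items ∧ e.getD 1 0 ∈ items
instance (items : List Int) (equivalences : List (List Int)) : Decidable (Pre_update_equivalence items equivalences) := by unfold Pre_update_equivalence; infer_instance

def pvWitness_update_equivalence : List Int × List (List Int) := ([1, 2, 3, 4], [[1, 2], [3, 4], [2, 3]])

def Spec_update_equivalence (items : List Int) (equivalences : List (List Int)) (out : List (Int × Int)) : Prop := out = update_equivalence_alt items equivalences
instance (items : List Int) (equivalences : List (List Int)) (out : List (Int × Int)) : Decidable (Spec_update_equivalence items equivalences out) := by unfold Spec_update_equivalence; infer_instance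

-- ===== CLAIM (what is proved, stated in full; the proofs are below) =====
def Claim_equal_update_equivalence : Prop := ∀ (items : List Int) (equivalences : List (List Int)), Dom_update_equivalence items equivalences → Pre_update_equivalence items equivalences → Spec_update_equivalence items equivalences (update_equivalence items equivalences)

-- ===== LEMMAS AND PROOFS =====

-- Parent-chain reachability in B's forest: `Reach p x r n` = from x, following
-- parent pointers n steps, we hit the root r (p[r] = r).
inductive Reach (p : PySem.Dict Int Int) : Int → Int → Nat → Prop
  | self (r : Int) : p.get? r = some r → Reach p r r 0
  | step (x y r : Int) (n : Nat) : p.get? x = some y → y ≠ x → Reach p y r n →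
      Reach p x r (n + 1)

-- A's map is always flat: every stored value is itself a key mapped to itself.
def Flat (q : PySem.Dict Int Int) : Prop :=
  ∀ k v, q.get? k = some v → q.get? v = some v

-- The coupling invariant between B's lazy forest p and A's flat map q after t
-- processed equivalences.
def CInv (t : Nat) (p q : PySem.Dict Int Int) : Prop :=
  p.keys = q.keys ∧ q.keys.Nodup ∧ Flat q ∧
  ∀ k v, q.get? k = some v → ∃ n ≤ t, Reach p k v n

lemma reach_root {p : PySem.Dict Int Int} {x r : Int} {n : Nat}
    (h : Reach p x r n) : p.get? r = some r := by
  induction h with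
  | self r h => exact h
  | step x y r n h hne hr ih => exact ih

lemma bFind_of_reach {p : PySem.Dict Int Int} {x r : Int} {n : Nat}
    (h : Reach p x r n) : ∀ fuel, n < fuel → bFind fuel p x = r := by
  induction h with
  | self r h =>
      intro fuel hf
      match fuel, hf with
      | f + 1, _ =>
        simp [bFind, PySem.Dict.getD_of_get?_eq_some p r h]
  | step x y r n h hne hr ih =>
      intro fuel hf
      match fuel, hf with
      | f + 1, hf =>
        simp only [bFind, PySem.Dict.getD_of_get?_eq_some p x h]
        rw [if_neg hne]
        exact ih f (by omega)

lemma reach_mono {p : PySem.Dict Int Int} {x r : Int} {t t' : Nat}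
    (h : ∃ n ≤ t, Reach p x r n) (ht : t ≤ t') : ∃ n ≤ t', Reach p x r n := by
  obtain ⟨n, hn, hr⟩ := h
  exact ⟨n, by omega, hr⟩

-- Re-pointing the root ra to rb extends every path that ended at ra by one step.
lemma reach_insert_root {p : PySem.Dict Int Int} {ra rb x : Int} {n : Nat}
    (hrb : p.get? rb = some rb) (hne : rb ≠ ra)
    (h : Reach p x ra n) : Reach (p.insert ra rb) x rb (n + 1) := by
  induction h with
  | self r hr =>
      exact Reach.step r rb rb 0 (PySem.Dict.get?_insert_self p r rb) hne
        (Reach.self rb (by rw [PySem.Dict.get?_insert_of_ne p rb hne]; exact hrb))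
  | step x y r n h hyx hr ih =>
      have hxr : x ≠ r := by
        intro he; subst he
        rw [reach_root hr] at h
        exact hyx (Option.some.inj h).symm
      exact Reach.step x y rb (n + 1)
        (by rw [PySem.Dict.get?_insert_of_ne p rb hxr]; exact h) hyx (ih hne)

-- Paths ending at a root other than ra are untouched by the re-pointing.
lemma reach_insert_of_ne {p : PySem.Dict Int Int} {ra rb x r : Int} {n : Nat}
    (hra : p.get? ra = some ra) (hr : r ≠ ra) (h : Reach p x r n) :
    Reach (p.insert ra rb) x r n := by
  induction h with
  | self r hrr =>
      exact Reach.self r (by rw [PySem.Dict.get?_insert_of_ne p rb hr]; exact hrr)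
  | step x y r n h hyx hrch ih =>
      have hxra : x ≠ ra := by
        intro he; subst he
        rw [hra] at h
        exact hyx (Option.some.inj h).symm
      exact Reach.step x y r n
        (by rw [PySem.Dict.get?_insert_of_ne p rb hxra]; exact h) hyx (ih hr)

-- Inserting a key with the value it already has leaves the dict unchanged.
lemma insert_same {q : PySem.Dict Int Int} {k v : Int}
    (hnd : q.keys.Nodup) (h : q.get? k = some v) : q.insert k v = q := by
  apply PySem.Dict.ext
  have hc : q.contains k = true := by
    rw [PySem.Dict.contains_eq_isSome_get? q k, h]; rfl
  rw [PySem.Dict.items_insert_of_contains q v hc]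
  calc q.items.map (fun p => if (p.1 == k) = true then (k, v) else p)
      = q.items.map id := by
        apply List.map_congr_left
        intro a ha
        by_cases hk : a.1 = k
        · have : a = (k, v) := by
            have h2 := PySem.Dict.get?_of_mem_items q (k := a.1) (v := a.2) (by simpa using ha) hnd
            rw [hk, h] at h2
            have h3 : a.2 = v := (Option.some.inj h2).symm
            cases a; simp_all
          simp [this]
        · simp [hk]
    _ = q.items := List.map_id q.items

-- A's find on a flat map returns the stored root and leaves the map unchanged.
lemma aFind_flat {q : PySem.Dict Int Int} {a va : Int} (f : Nat)
    (hnd : q.keys.Nodup) (hfl : Flat q) (ha : q.get? a = some va) :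
    aFind (f + 2) q a = (q, va) := by
  have hva : q.get? va = some va := hfl a va ha
  show (if q.getD a a ≠ a then _ else (q, q.getD a a)) = (q, va)
  rw [PySem.Dict.getD_of_get?_eq_some q a ha]
  by_cases hav : va = a
  · rw [if_neg (by simp [hav])]
  · rw [if_pos hav]
    have hinner : aFind (f + 1) q va = (q, va) := by
      show (if q.getD va va ≠ va then _ else (q, q.getD va va)) = (q, va)
      rw [PySem.Dict.getD_of_get?_eq_some q va hva]
      simp
    simp only [hinner, insert_same hnd ha]
    exact congrArg (Prod.mk q) (PySem.Dict.getD_of_get?_eq_some q a ha)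

-- Characterisation of A's relabel loop over a duplicate-free key list.
lemma relabel_get? (r1 r2 : Int) :
    ∀ (l : List Int) (d0 d : PySem.Dict Int Int), l.Nodup →
    (∀ k ∈ l, d0.get? k = d.get? k) → (∀ k ∈ l, (d.get? k).isSome) →
    (∀ j, (l.foldl (fun dd k => if dd.getD k k = r1 then dd.insert k r2 else dd) d0).get? j
        = if j ∈ l ∧ d.get? j = some r1 then some r2 else d0.get? j)
    ∧ (l.foldl (fun dd k => if dd.getD k k = r1 then dd.insert k r2 else dd) d0).keys = d0.keys := by
  intro l
  induction l with
  | nil => intro d0 d _ _ _; simp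
  | cons k l ih =>
      intro d0 d hnd hagree hsome
      obtain ⟨vk, hvk⟩ : ∃ v, d.get? k = some v := by
        have h := hsome k (by simp)
        cases hg : d.get? k
        · rw [hg] at h; simp at h
        · exact ⟨_, rfl⟩
      have hd0k : d0.get? k = some vk := by rw [hagree k (by simp)]; exact hvk
      have hstep : (if d0.getD k k = r1 then d0.insert k r2 else d0)
          = if vk = r1 then d0.insert k r2 else d0 := by
        rw [PySem.Dict.getD_of_get?_eq_some d0 k hd0k]
      have hknl : k ∉ l := (List.nodup_cons.mp hnd).1
      have hndl : l.Nodup := (List.nodup_cons.mp hnd).2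
      set d1 : PySem.Dict Int Int := if vk = r1 then d0.insert k r2 else d0 with hd1
      have hagree1 : ∀ k' ∈ l, d1.get? k' = d.get? k' := by
        intro k' hk'
        have hne : k' ≠ k := fun he => hknl (he ▸ hk')
        rw [hd1]
        split
        · rw [PySem.Dict.get?_insert_of_ne d0 r2 hne]; exact hagree k' (by simp [hk'])
        · exact hagree k' (by simp [hk'])
      have hsome1 : ∀ k' ∈ l, (d.get? k').isSome := fun k' hk' => hsome k' (by simp [hk'])
      obtain ⟨ihget, ihkeys⟩ := ih d1 d hndl hagree1 hsome1
      have hd1get : ∀ j, j ≠ k → d1.get? j = d0.get? j := by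
        intro j hjk
        rw [hd1]
        split
        · rw [PySem.Dict.get?_insert_of_ne d0 r2 hjk]
        · rfl
      constructor
      · intro j
        simp only [List.foldl_cons, hstep]
        rw [ihget j]
        by_cases hjl : j ∈ l
        · by_cases hjr : d.get? j = some r1
          · rw [if_pos ⟨hjl, hjr⟩, if_pos ⟨by simp [hjl], hjr⟩]
          · rw [if_neg (fun hc => hjr hc.2), if_neg (fun hc => hjr hc.2)]
            exact hd1get j (fun he => hknl (he ▸ hjl))
        · by_cases hjk : j = k
          · subst hjk
            by_cases hvr : vk = r1
            · have hdj : d.get? j = some r1 := hvr ▸ hvk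
              rw [if_neg (fun hc => hjl hc.1), if_pos ⟨by simp, hdj⟩, hd1, if_pos hvr]
              exact PySem.Dict.get?_insert_self d0 j r2
            · have hdj : ¬ d.get? j = some r1 := by
                rw [hvk]; exact fun hc => hvr (Option.some.inj hc)
              rw [if_neg (fun hc => hjl hc.1), if_neg (fun hc => hdj hc.2), hd1, if_neg hvr]
          · have hnm : ¬ (j ∈ k :: l) := by simp [hjk, hjl]
            rw [if_neg (fun hc => hjl hc.1), if_neg (fun hc => hnm hc.1)]
            exact hd1get j hjk
      · simp only [List.foldl_cons, hstep]
        rw [ihkeys, hd1]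
        split
        · exact PySem.Dict.keys_insert_of_contains d0 r2
            (by rw [PySem.Dict.contains_eq_isSome_get? d0 k, hd0k]; rfl)
        · rfl

-- Building a dict by inserting g(it) for each item, from the right.
lemma foldl_insert_fun_get? (g : Int → Int) :
    ∀ (items : List Int) (d : PySem.Dict Int Int) (j : Int),
    (items.foldl (fun d it => d.insert it (g it)) d).get? j
      = if j ∈ items then some (g j) else d.get? j := by
  intro items
  induction items using List.reverseRecOn with
  | nil => simp
  | append_singleton l x ih =>
      intro d j
      rw [List.foldl_append]
      simp only [List.foldl_cons, List.foldl_nil]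
      by_cases hjx : j = x
      · subst hjx; simp [PySem.Dict.get?_insert_self]
      · rw [PySem.Dict.get?_insert_of_ne _ _ hjx, ih]
        simp [hjx]

lemma mem_keys_iff_get?_isSome {q : PySem.Dict Int Int} {k : Int} :
    k ∈ q.keys ↔ (q.get? k).isSome := by
  constructor
  · intro h
    cases hg : q.get? k
    · exact absurd ((PySem.Dict.get?_eq_none_iff_not_mem_keys q k).mp hg) (by simp [h])
    · rfl
  · intro h
    by_contra hk
    rw [(PySem.Dict.get?_eq_none_iff_not_mem_keys q k).mpr hk] at h
    simp at h

lemma get?_some_of_mem_keys {q : PySem.Dict Int Int} {k : Int}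
    (h : k ∈ q.keys) : ∃ v, q.get? k = some v := by
  have hs := mem_keys_iff_get?_isSome.mp h
  cases hg : q.get? k
  · rw [hg] at hs; simp at hs
  · exact ⟨_, rfl⟩

-- One union step preserves the coupling invariant.
lemma union_step (FA t : Nat) {M : Nat} {p q : PySem.Dict Int Int} {a b : Int}
    (hInv : CInv t p q) (htM : t < M) (ha : a ∈ q.keys) (hb : b ∈ q.keys) :
    CInv (t + 1)
      (let r1 := bFind M p a
       let r2 := bFind M p b
       if r1 ≠ r2 then p.insert r1 r2 else p)
      (aUnion (FA + 2) q a b)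
    ∧ (aUnion (FA + 2) q a b).keys = q.keys := by
  obtain ⟨hkeys, hnd, hfl, hreach⟩ := hInv
  obtain ⟨va, hva⟩ := get?_some_of_mem_keys ha
  obtain ⟨vb, hvb⟩ := get?_some_of_mem_keys hb
  obtain ⟨na, hna, hra⟩ := hreach a va hva
  obtain ⟨nb, hnb, hrb⟩ := hreach b vb hvb
  have hfa : bFind M p a = va := bFind_of_reach hra M (by omega)
  have hfb : bFind M p b = vb := bFind_of_reach hrb M (by omega)
  have hAa : aFind (FA + 2) q a = (q, va) := aFind_flat FA hnd hfl hva
  have hAb : aFind (FA + 2) q b = (q, vb) := aFind_flat FA hnd hfl hvb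
  have hAu : aUnion (FA + 2) q a b
      = if va ≠ vb then
          q.keys.foldl (fun dd k => if dd.getD k k = va then dd.insert k vb else dd) q
        else q := by
    unfold aUnion
    rw [hAa]
    simp only
    rw [hAb]
  simp only [hfa, hfb]
  by_cases hne : va = vb
  · subst hne
    rw [hAu, if_neg (by simp), if_neg (by simp)]
    refine ⟨⟨hkeys, hnd, hfl, fun k v hv => reach_mono (hreach k v hv) (by omega)⟩, rfl⟩
  · have hvaroot : p.get? va = some va := reach_root hra
    have hvbroot : p.get? vb = some vb := reach_root hrb
    obtain ⟨hrel, hrelkeys⟩ := relabel_get? va vb q.keys q q hnd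
      (fun _ _ => rfl) (fun k hk => mem_keys_iff_get?_isSome.mp hk)
    have hq' : ∀ j, (aUnion (FA + 2) q a b).get? j
        = if q.get? j = some va then some vb else q.get? j := by
      intro j
      rw [hAu, if_pos hne, hrel j]
      by_cases hj : q.get? j = some va
      · have hjk : j ∈ q.keys := mem_keys_iff_get?_isSome.mpr (by rw [hj]; rfl)
        simp [hj, hjk]
      · simp [hj]
    have hkeys' : (aUnion (FA + 2) q a b).keys = q.keys := by
      rw [hAu, if_pos hne]; exact hrelkeys
    rw [if_pos hne]
    refine ⟨⟨?_, ?_, ?_, ?_⟩, hkeys'⟩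
    · rw [hkeys']
      rw [PySem.Dict.keys_insert_of_contains p vb
        (by rw [PySem.Dict.contains_eq_isSome_get? p va, hvaroot]; rfl)]
      exact hkeys
    · rw [hkeys']; exact hnd
    · -- Flat q'
      intro k v hv
      rw [hq'] at hv ⊢
      by_cases hk : q.get? k = some va
      · rw [if_pos hk] at hv
        have hvvb : v = vb := Option.some.inj hv.symm
        subst hvvb
        have hqvb : q.get? v = some v := hfl b v hvb
        rw [if_neg (by rw [hqvb]; intro hc; exact hne (Option.some.inj hc).symm), hqvb]
      · rw [if_neg hk] at hv
        have hvv : q.get? v = some v := hfl k v hv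
        have hvna : v ≠ va := fun he => hk (he ▸ hv)
        rw [if_neg (by rw [hvv]; intro hc; exact hvna (Option.some.inj hc)), hvv]
    · -- Reach in p'
      intro k v hv
      rw [hq'] at hv
      by_cases hk : q.get? k = some va
      · rw [if_pos hk] at hv
        have hvvb : v = vb := Option.some.inj hv.symm
        subst hvvb
        obtain ⟨n, hn, hr⟩ := hreach k va hk
        exact ⟨n + 1, by omega, reach_insert_root hvbroot (fun he => hne he.symm) hr⟩
      · rw [if_neg hk] at hv
        obtain ⟨n, hn, hr⟩ := hreach k v hv
        have hvne : v ≠ va := fun he => hk (he ▸ hv)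
        exact ⟨n, by omega, reach_insert_of_ne hvaroot hvne hr⟩

lemma cinv_mono {t t' : Nat} {p q : PySem.Dict Int Int}
    (h : CInv t p q) (ht : t ≤ t') : CInv t' p q :=
  ⟨h.1, h.2.1, h.2.2.1, fun k v hv => reach_mono (h.2.2.2 k v hv) ht⟩

-- Named forms of the two fold bodies and the initial dict (definitionally the
-- ones appearing in the ports).
def initD (items : List Int) : PySem.Dict Int Int :=
  items.foldl (fun d it => d.insert it it) PySem.Dict.empty

def stepA (fuel : Nat) (d : PySem.Dict Int Int) (eq : List Int) : PySem.Dict Int Int :=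
  if 1 < PySem.List.len eq then
    aUnion fuel d (PySem.List.pyGetD eq 0 0) (PySem.List.pyGetD eq 1 0)
  else d

def stepB (M : Nat) (p : PySem.Dict Int Int) (eq : List Int) : PySem.Dict Int Int :=
  if 1 < PySem.List.len eq then
    let r1 := bFind M p (PySem.List.pyGetD eq 0 0)
    let r2 := bFind M p (PySem.List.pyGetD eq 1 0)
    if r1 ≠ r2 then p.insert r1 r2 else p
  else p

lemma update_equivalence_eq (items : List Int) (equivalences : List (List Int)) :
    update_equivalence items equivalences
      = (equivalences.foldl (stepA (items.length + 2)) (initD items)).items := rfl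

lemma update_equivalence_alt_eq (items : List Int) (equivalences : List (List Int)) :
    update_equivalence_alt items equivalences
      = (items.foldl
          (fun d it => d.insert it
            (bFind (equivalences.length + 1)
              (equivalences.foldl (stepB (equivalences.length + 1)) (initD items)) it))
          PySem.Dict.empty).items := rfl

-- The whole equivalence fold preserves the coupling invariant.
lemma fold_equiv (FA M : Nat) :
    ∀ (eqs : List (List Int)) (t : Nat) (p q : PySem.Dict Int Int),
    CInv t p q → t + eqs.length < M →
    (∀ e ∈ eqs, 1 < e.length → e.getD 0 0 ∈ q.keys ∧ e.getD 1 0 ∈ q.keys) →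
    CInv (t + eqs.length) (eqs.foldl (stepB M) p) (eqs.foldl (stepA (FA + 2)) q)
    ∧ (eqs.foldl (stepA (FA + 2)) q).keys = q.keys := by
  intro eqs
  induction eqs with
  | nil => intro t p q hInv _ _; exact ⟨by simpa using hInv, rfl⟩
  | cons e eqs ih =>
      intro t p q hInv hM hpre
      simp only [List.length_cons] at hM
      simp only [List.foldl_cons, List.length_cons]
      by_cases hlen : 1 < e.length
      · have hcond : (1 : Int) < PySem.List.len e := by
          rw [PySem.List.len_eq]
          exact_mod_cast hlen
        have hmem := hpre e (by simp) hlen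
        have hsA : stepA (FA + 2) q e
            = aUnion (FA + 2) q (e.getD 0 0) (e.getD 1 0) := by
          rw [stepA, if_pos hcond, PySem.List.pyGetD_ofNat', PySem.List.pyGetD_ofNat']
        have hsB : stepB M p e
            = (let r1 := bFind M p (e.getD 0 0)
               let r2 := bFind M p (e.getD 1 0)
               if r1 ≠ r2 then p.insert r1 r2 else p) := by
          rw [stepB, if_pos hcond, PySem.List.pyGetD_ofNat', PySem.List.pyGetD_ofNat']
        obtain ⟨hInv', hkeys'⟩ :=
          union_step FA t (M := M) hInv (by omega) hmem.1 hmem.2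
        rw [hsA, hsB]
        obtain ⟨hI, hK⟩ := ih (t + 1) _ _ hInv' (by omega)
          (fun e' he' hl' => by
            rw [hkeys']; exact hpre e' (by simp [he']) hl')
        refine ⟨by rw [(by omega : t + (eqs.length + 1) = t + 1 + eqs.length)]; exact hI, ?_⟩
        rw [hK, hkeys']
      · have hcond : ¬ (1 : Int) < PySem.List.len e := by
          rw [PySem.List.len_eq]
          exact_mod_cast hlen
        have hsA : stepA (FA + 2) q e = q := by
          rw [stepA, if_neg hcond]
        have hsB : stepB M p e = p := by
          rw [stepB, if_neg hcond]
        rw [hsA, hsB]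
        obtain ⟨hI, hK⟩ := ih t p q hInv (by omega)
          (fun e' he' hl' => hpre e' (by simp [he']) hl')
        exact ⟨cinv_mono hI (by omega), hK⟩

lemma initD_get? (items : List Int) (j : Int) :
    (initD items).get? j = if j ∈ items then some j else none := by
  rw [initD]
  have h := foldl_insert_fun_get? (fun x : Int => x) items PySem.Dict.empty j
  simpa [PySem.Dict.get?_empty] using h

lemma initD_keys (items : List Int) : (initD items).keys = PySem.Set.ofList items := by
  rw [initD, PySem.Dict.keys_foldl_insert items (fun _ x => x) PySem.Dict.empty]
  exact PySem.Set.update_empty items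

lemma initD_nodup (items : List Int) : (initD items).keys.Nodup := by
  rw [initD_keys]
  exact PySem.Set.nodup_ofList items

lemma initD_get?_inv (items : List Int) {k v : Int}
    (hv : (initD items).get? k = some v) : k ∈ items ∧ v = k := by
  rw [initD_get?] at hv
  by_cases hk : k ∈ items
  · rw [if_pos hk] at hv
    exact ⟨hk, Option.some.inj hv.symm⟩
  · rw [if_neg hk] at hv
    exact absurd hv (by simp)

lemma cinv_init (items : List Int) : CInv 0 (initD items) (initD items) := by
  refine ⟨rfl, initD_nodup items, ?_, ?_⟩
  · intro k v hv
    obtain ⟨hk, hvk⟩ := initD_get?_inv items hv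
    subst hvk
    rw [initD_get?, if_pos hk]
  · intro k v hv
    obtain ⟨hk, hvk⟩ := initD_get?_inv items hv
    subst hvk
    exact ⟨0, le_refl 0, Reach.self v hv⟩

-- ===== VERDICT (by name: the statement is the Claim_ definition above) =====
theorem update_equivalence_spec : Claim_equal_update_equivalence := by
  intro items eqs _ hpre
  unfold Spec_update_equivalence
  unfold Pre_update_equivalence at hpre
  rw [update_equivalence_eq, update_equivalence_alt_eq]
  have hpre' : ∀ e ∈ eqs, 1 < e.length →
      e.getD 0 0 ∈ (initD items).keys ∧ e.getD 1 0 ∈ (initD items).keys := by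
    intro e he hl
    obtain ⟨h0, h1⟩ := hpre e he hl
    rw [initD_keys]
    exact ⟨(PySem.Set.mem_ofList items _).mpr h0, (PySem.Set.mem_ofList items _).mpr h1⟩
  obtain ⟨⟨hkeysPQ, hnd, hfl, hreach⟩, hK⟩ :=
    fold_equiv items.length (eqs.length + 1) eqs 0 (initD items) (initD items)
      (cinv_init items) (by omega) hpre'
  have hBget : ∀ j, (items.foldl
      (fun d it => d.insert it
        (bFind (eqs.length + 1) (eqs.foldl (stepB (eqs.length + 1)) (initD items)) it))
      PySem.Dict.empty).get? j
      = if j ∈ items then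
          some (bFind (eqs.length + 1) (eqs.foldl (stepB (eqs.length + 1)) (initD items)) j)
        else none := by
    intro j
    have h := foldl_insert_fun_get?
      (fun it => bFind (eqs.length + 1) (eqs.foldl (stepB (eqs.length + 1)) (initD items)) it)
      items PySem.Dict.empty j
    simpa using h
  have hBkeys : (items.foldl
      (fun d it => d.insert it
        (bFind (eqs.length + 1) (eqs.foldl (stepB (eqs.length + 1)) (initD items)) it))
      PySem.Dict.empty).keys = PySem.Set.ofList items := by
    have h := PySem.Dict.keys_foldl_insert items
      (fun _ it => bFind (eqs.length + 1) (eqs.foldl (stepB (eqs.length + 1)) (initD items)) it)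
      PySem.Dict.empty
    simpa [PySem.Set.update_empty] using h
  have hBnd : (items.foldl
      (fun d it => d.insert it
        (bFind (eqs.length + 1) (eqs.foldl (stepB (eqs.length + 1)) (initD items)) it))
      PySem.Dict.empty).keys.Nodup := by
    rw [hBkeys]
    exact PySem.Set.nodup_ofList items
  rw [PySem.Dict.items_eq_map_keys _ hnd 0, PySem.Dict.items_eq_map_keys _ hBnd 0,
    hK, initD_keys, hBkeys]
  apply List.map_congr_left
  intro k hk
  have hki : k ∈ items := (PySem.Set.mem_ofList items k).mp hk
  obtain ⟨v, hv⟩ := get?_some_of_mem_keys (q := eqs.foldl (stepA (items.length + 2)) (initD items))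
    (by rw [hK, initD_keys]; exact hk)
  obtain ⟨n, hn, hr⟩ := hreach k v hv
  have hbf : bFind (eqs.length + 1) (eqs.foldl (stepB (eqs.length + 1)) (initD items)) k = v :=
    bFind_of_reach hr (eqs.length + 1) (by omega)
  rw [PySem.Dict.getD_of_get?_eq_some _ 0 hv,
    PySem.Dict.getD_of_get?_eq_some _ 0 (by rw [hBget k, if_pos hki]), hbf]
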